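-- pv_equiv track=rewrite | github.com/heojungeun/codingtestPractice | level3/43237.py | solution
-- ===== SOURCE A (Python) =====
-- def solution(budgets, M):
--     mins, maxs = 0, max(budgets)
--     answer = 0
--     while mins <= maxs:
--         mid = (mins + maxs) // 2 # mid <- 상한가
--         tmp = [i if i < mid else mid for i in budgets]
--         if sum(tmp) > M:
--             maxs = mid - 1
--         elif sum(tmp) <= M:
--             answer = mid
--             mins = mid + 1
--     return answer
-- ===== SOURCE B (Python) =====
-- def solution(budgets, M):
--     # sort + prefix scan: locate the cap segment directly instead of binary-searching cap values
--     bs = sorted(budgets)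
--     n = len(bs)
--     if sum(bs) <= M:
--         return max(bs[-1], 0)
--     pre = 0
--     for i, b in enumerate(bs):
--         c = (M - pre) // (n - i)
--         if b > c:
--             return max(c, 0)
--         pre += b
--     return 0
-- ===== Notes on version B (the rewrite author's own statement) =====
-- stated objective: faster
-- what changed: Replaces the binary search over cap values (each step rebuilding and summing a capped copy of the whole list, ~31 full passes for 32-bit values) with sort + a single prefix-sum scan that locates the cap's segment and computes the cap by one floor division.
import Mathlib
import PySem

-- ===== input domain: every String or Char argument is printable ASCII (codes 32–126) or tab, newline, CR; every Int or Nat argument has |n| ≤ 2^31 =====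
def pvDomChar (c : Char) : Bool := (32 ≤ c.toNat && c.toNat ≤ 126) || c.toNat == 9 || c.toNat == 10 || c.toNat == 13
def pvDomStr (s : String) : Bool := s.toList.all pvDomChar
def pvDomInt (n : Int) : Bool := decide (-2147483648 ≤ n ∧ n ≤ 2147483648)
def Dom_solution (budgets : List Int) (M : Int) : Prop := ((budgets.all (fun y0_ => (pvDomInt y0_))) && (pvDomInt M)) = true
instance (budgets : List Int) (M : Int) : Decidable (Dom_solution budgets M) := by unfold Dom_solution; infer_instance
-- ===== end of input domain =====

-- B replaces A's binary search over cap values (each step re-summing a capped copy of the list)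
-- by sort + one prefix-sum scan that finds the cap's segment and computes it with one floor division.

-- ===== PORT A =====
-- the while-loop of A: state (mins, maxs, answer)
def solLoopA (budgets : List Int) (M : Int) (mins maxs answer : Int) : Int :=
  if h : mins ≤ maxs then
    let mid := PySem.Int.floordiv (mins + maxs) 2
    let tmp := budgets.map (fun i => if i < mid then i else mid)
    if tmp.sum > M then
      solLoopA budgets M mins (mid - 1) answer
    else
      -- elif sum(tmp) <= M  (the exact complement of the branch above)
      solLoopA budgets M (mid + 1) maxs mid
  else answer
termination_by (maxs - mins + 1).toNat
decreasing_by
  · have := PySem.Int.floordiv_two_mid_bounds h; omega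
  · have := PySem.Int.floordiv_two_mid_bounds h; omega

-- max(budgets) raises on [], excluded by Pre_; getD 0 is a dummy there
def solution (budgets : List Int) (M : Int) : Int :=
  solLoopA budgets M 0 ((PySem.List.max? budgets (fun y => y)).getD 0) 0

-- ===== PORT B =====
-- the for-loop of Source B: state (remaining sorted suffix, i, pre)
def solLoopB (M n : Int) : List Int → Int → Int → Int
  | [], _, _ => 0
  | b :: rest, i, pre =>
    let c := PySem.Int.floordiv (M - pre) (n - i)
    if b > c then max c 0
    else solLoopB M n rest (i + 1) (pre + b)

-- bs[-1] raises on [], excluded by Pre_; getD 0 is a dummy there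
def solution_alt (budgets : List Int) (M : Int) : Int :=
  let bs := PySem.List.sorted budgets (fun y => y) false
  let n : Int := bs.length
  if bs.sum ≤ M then max ((PySem.List.pyGet? bs (-1)).getD 0) 0
  else solLoopB M n bs 0 0

-- ===== PRECONDITION & SPEC =====
-- Pre_ excludes only the empty list, on which A raises ValueError (max of an empty sequence)
def Pre_solution (budgets : List Int) (M : Int) : Prop := budgets ≠ []
instance (budgets : List Int) (M : Int) : Decidable (Pre_solution budgets M) := by
  unfold Pre_solution; infer_instance

def pvWitness_solution : List Int × Int := ([1, 2, 3], 4)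

def Spec_solution (budgets : List Int) (M : Int) (out : Int) : Prop := out = solution_alt budgets M
instance (budgets : List Int) (M : Int) (out : Int) : Decidable (Spec_solution budgets M out) := by
  unfold Spec_solution; infer_instance

-- ===== CLAIM (what is proved, stated in full; the proofs are below) =====
def Claim_equal_solution : Prop := ∀ (budgets : List Int) (M : Int), Dom_solution budgets M → Pre_solution budgets M → Spec_solution budgets M (solution budgets M)

-- ===== LEMMAS AND PROOFS =====

-- the capped sum "sum(min(b, c) for b in bs)"
def fsum (bs : List Int) (c : Int) : Int := (bs.map (fun b => min b c)).sum

theorem tmp_sum_eq_fsum (bs : List Int) (c : Int) :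
    (bs.map (fun i => if i < c then i else c)).sum = fsum bs c := by
  unfold fsum
  congr 1
  apply List.map_congr_left
  intro a _
  rcases lt_trichotomy a c with h | h | h <;> simp [min_def] <;> omega

theorem fsum_perm {bs bs' : List Int} (h : bs.Perm bs') (c : Int) : fsum bs c = fsum bs' c :=
  List.Perm.sum_eq (h.map _)

theorem fsum_mono (bs : List Int) {c c' : Int} (h : c ≤ c') : fsum bs c ≤ fsum bs c' := by
  induction bs with
  | nil => simp [fsum]
  | cons b t ih =>
    simp only [fsum, List.map_cons, List.sum_cons] at *
    exact add_le_add (min_le_min (le_refl b) h) ih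

theorem fsum_le_sum (bs : List Int) (c : Int) : fsum bs c ≤ bs.sum := by
  induction bs with
  | nil => simp [fsum]
  | cons b t ih =>
    simp only [fsum, List.map_cons, List.sum_cons] at *
    exact add_le_add (min_le_left b c) ih

theorem fsum_of_le (bs : List Int) (c : Int) (h : ∀ b ∈ bs, b ≤ c) : fsum bs c = bs.sum := by
  induction bs with
  | nil => simp [fsum]
  | cons b t ih =>
    simp only [fsum, List.map_cons, List.sum_cons] at ih ⊢
    rw [min_eq_left (h b (by simp)), ih (fun x hx => h x (by simp [hx]))]

theorem fsum_const (bs : List Int) (c : Int) (h : ∀ b ∈ bs, c ≤ b) :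
    fsum bs c = bs.length * c := by
  induction bs with
  | nil => simp [fsum]
  | cons b t ih =>
    simp only [fsum, List.map_cons, List.sum_cons, List.length_cons] at ih ⊢
    rw [min_eq_right (h b (by simp)), ih (fun x hx => h x (by simp [hx]))]
    push_cast; ring

-- split computation of fsum at a point x lying between the prefix and the suffix
theorem fsum_split (take rest : List Int) (x : Int)
    (h1 : ∀ a ∈ take, a ≤ x) (h2 : ∀ b ∈ rest, x ≤ b) :
    fsum (take ++ rest) x = take.sum + rest.length * x := by
  unfold fsum
  rw [List.map_append, List.sum_append]
  have e1 : (take.map (fun b => min b x)).sum = take.sum := fsum_of_le take x h1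
  have e2 : (rest.map (fun b => min b x)).sum = rest.length * x := fsum_const rest x h2
  rw [e1, e2]

-- A's loop when the capped sum never exceeds M on the interval: answer climbs to hi
theorem loopA_all (budgets : List Int) (M : Int) :
    ∀ k (lo hi ans : Int), (hi - lo + 1).toNat ≤ k →
      (∀ c, lo ≤ c → c ≤ hi → fsum budgets c ≤ M) →
      solLoopA budgets M lo hi ans = if lo ≤ hi then hi else ans := by
  intro k
  induction k with
  | zero =>
    intro lo hi ans hk _
    rw [solLoopA]
    rw [dif_neg (by omega), if_neg (by omega)]
  | succ k ih =>
    intro lo hi ans hk hall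
    by_cases hlh : lo ≤ hi
    · have hmid := PySem.Int.floordiv_two_mid_bounds hlh
      set mid := PySem.Int.floordiv (lo + hi) 2 with hmiddef
      rw [solLoopA]
      rw [dif_pos hlh]
      simp only [← hmiddef, tmp_sum_eq_fsum]
      have hle : fsum budgets mid ≤ M := hall mid hmid.1 hmid.2
      rw [if_neg (by omega)]
      rw [ih (mid + 1) hi mid (by omega)
          (fun c hc1 hc2 => hall c (by omega) hc2)]
      split_ifs <;> omega
    · rw [solLoopA]
      rw [dif_neg hlh, if_neg hlh]

-- A's loop when M sits below the total: with threshold cs (fsum c ≤ M ↔ c ≤ cs)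
theorem loopA_main (budgets : List Int) (M cs : Int)
    (hP : ∀ x, fsum budgets x ≤ M ↔ x ≤ cs) :
    ∀ k (lo hi ans : Int), (hi - lo + 1).toNat ≤ k →
      solLoopA budgets M lo hi ans = if lo ≤ hi ∧ lo ≤ cs then min cs hi else ans := by
  intro k
  induction k with
  | zero =>
    intro lo hi ans hk
    rw [solLoopA]
    rw [dif_neg (show ¬ lo ≤ hi by omega),
        if_neg (show ¬ (lo ≤ hi ∧ lo ≤ cs) by omega)]
  | succ k ih =>
    intro lo hi ans hk
    by_cases hlh : lo ≤ hi
    · have hmid := PySem.Int.floordiv_two_mid_bounds hlh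
      set mid := PySem.Int.floordiv (lo + hi) 2 with hmiddef
      rw [solLoopA]
      rw [dif_pos hlh]
      simp only [← hmiddef, tmp_sum_eq_fsum]
      by_cases hgt : fsum budgets mid > M
      · have hcs : cs < mid := by
          by_contra hc
          exact absurd ((hP mid).mpr (by omega)) (by omega)
        rw [if_pos hgt, ih lo (mid - 1) ans (by omega)]
        split_ifs <;> omega
      · have hcs : mid ≤ cs := (hP mid).mp (by omega)
        rw [if_neg hgt, ih (mid + 1) hi mid (by omega)]
        split_ifs <;> omega
    · rw [solLoopA]
      rw [dif_neg hlh, if_neg (show ¬ (lo ≤ hi ∧ lo ≤ cs) from fun h => hlh h.1)]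

theorem solLoopB_cons (M n b : Int) (rest : List Int) (i pre : Int) :
    solLoopB M n (b :: rest) i pre =
      if b > PySem.Int.floordiv (M - pre) (n - i) then max (PySem.Int.floordiv (M - pre) (n - i)) 0
      else solLoopB M n rest (i + 1) (pre + b) := by
  rw [solLoopB]

-- B's loop finds the threshold c: fsum bs c ≤ M < fsum bs (c+1), returning max c 0
theorem loopB_spec (M : Int) (bs : List Int) (hsort : bs.Pairwise (· ≤ ·))
    (hM : M < bs.sum) :
    ∀ rest take, bs = take ++ rest → rest ≠ [] →
      (take = [] ∨ ∃ t0 a0, take = t0 ++ [a0] ∧ fsum bs a0 ≤ M) →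
      ∃ c, solLoopB M (bs.length : Int) rest (take.length : Int) take.sum = max c 0 ∧
           fsum bs c ≤ M ∧ M < fsum bs (c + 1) := by
  intro rest
  induction rest with
  | nil => intro take _ hne _; exact absurd rfl hne
  | cons b r ih =>
    intro take hsplit _ hprev
    have hpw := hsort
    rw [hsplit, List.pairwise_append] at hpw
    obtain ⟨hpwt, hpwr, hcross⟩ := hpw
    have hbr : ∀ x ∈ r, b ≤ x := by
      intro x hx; exact (List.pairwise_cons.mp hpwr).1 x hx
    -- arithmetic facts about m and c
    have hlen : (bs.length : Int) - (take.length : Int) = ((b :: r).length : Int) := by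
      rw [hsplit]; push_cast [List.length_append]; ring
    have hmpos : (0 : Int) < ((b :: r).length : Int) := by
      exact_mod_cast Nat.succ_pos r.length
    set m : Int := ((b :: r).length : Int) with hmdef
    set c : Int := PySem.Int.floordiv (M - take.sum) m with hcdef
    obtain ⟨hd1, hd2⟩ : c * m ≤ M - take.sum ∧ M - take.sum < (c + 1) * m :=
      (PySem.Int.floordiv_eq_iff_of_pos hmpos).mp hcdef.symm
    rw [mul_comm] at hd1 hd2
    -- every element of take is ≤ c
    have htake_le_c : ∀ a ∈ take, a ≤ c := by
      rcases hprev with h0 | ⟨t0, a0, hts, ha0⟩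
      · intro a ha; rw [h0] at ha; simp at ha
      · have ha0b : ∀ x ∈ (b :: r), a0 ≤ x := by
          intro x hx
          exact hcross a0 (by rw [hts]; simp) x hx
        have ht0a0 : ∀ x ∈ take, x ≤ a0 := by
          intro x hx
          rw [hts] at hx
          rcases List.mem_append.mp hx with h | h
          · rw [hts] at hpwt
            exact (List.pairwise_append.mp hpwt).2.2 x h a0 (by simp)
          · simp at h; omega
        have hfa0 : fsum bs a0 = take.sum + m * a0 := by
          rw [hsplit]; exact fsum_split take (b :: r) a0 ht0a0 ha0b
        have ha0c : a0 ≤ c := by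
          rw [hcdef, PySem.Int.le_floordiv_iff_mul_le hmpos, mul_comm]
          omega
        intro a ha; have := ht0a0 a ha; omega
    by_cases hbc : b > c
    · -- return max(c, 0)
      refine ⟨c, ?_, ?_, ?_⟩
      · rw [solLoopB_cons, hlen, ← hcdef, if_pos hbc]
      · have : fsum bs c = take.sum + m * c := by
          rw [hsplit]
          exact fsum_split take (b :: r) c htake_le_c
            (fun x hx => by
              rcases List.mem_cons.mp hx with h | h
              · omega
              · have := hbr x h; omega)
        omega
      · have : fsum bs (c + 1) = take.sum + m * (c + 1) := by
          rw [hsplit]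
          exact fsum_split take (b :: r) (c + 1)
            (fun a ha => by have := htake_le_c a ha; omega)
            (fun x hx => by
              rcases List.mem_cons.mp hx with h | h
              · omega
              · have := hbr x h; omega)
        omega
    · -- continue with take ++ [b]
      have hfb : fsum bs b ≤ M := by
        have : fsum bs b = take.sum + m * b := by
          rw [hsplit]
          exact fsum_split take (b :: r) b (fun a ha => hcross a ha b (by simp))
            (fun x hx => by
              rcases List.mem_cons.mp hx with h | h
              · omega
              · exact hbr x h)
        have hmb : m * b ≤ m * c := by
          apply mul_le_mul_of_nonneg_left (by omega) (by omega)
        omega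
      have hrne : r ≠ [] := by
        intro hr
        rw [hr] at hmdef hsplit
        have hsum1 : bs.sum = take.sum + b := by rw [hsplit]; simp
        have hm1 : m = 1 := by rw [hmdef]; simp
        rw [hm1, one_mul] at hd1
        omega
      obtain ⟨c', hc'⟩ := ih (take ++ [b]) (by rw [hsplit]; simp) hrne
        (Or.inr ⟨take, b, rfl, hfb⟩)
      refine ⟨c', ?_, hc'.2.1, hc'.2.2⟩
      rw [solLoopB_cons, hlen, ← hcdef, if_neg hbc]
      have e1 : ((take ++ [b]).length : Int) = (take.length : Int) + 1 := by
        push_cast [List.length_append, List.length_cons, List.length_nil]; ring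
      have e2 : (take ++ [b]).sum = take.sum + b := by simp
      rw [← e1, ← e2]
      exact hc'.1

-- last element of a ≤-pairwise-sorted list is its maximum
theorem getLast_isMax (bs : List Int) (hne : bs ≠ []) (hsort : bs.Pairwise (· ≤ ·)) :
    ∀ x ∈ bs, x ≤ bs.getLast hne := by
  intro x hx
  have hsplit := (List.dropLast_append_getLast hne).symm
  rw [hsplit] at hsort hx
  rcases List.mem_append.mp hx with h | h
  · exact (List.pairwise_append.mp hsort).2.2 x h _ (by simp)
  · simp at h; omega

-- ===== VERDICT (by name: the statement is the Claim_ definition above) =====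
theorem solution_spec : Claim_equal_solution := by
  intro budgets M _ hpre
  unfold Spec_solution solution solution_alt
  set bs := PySem.List.sorted budgets (fun y => y) false with hbs
  have hperm : bs.Perm budgets := PySem.List.sorted_perm budgets (fun y => y) false
  have hne : bs ≠ [] := by
    intro h
    exact hpre (List.nil_perm.mp (h ▸ hperm))
  have hsort : bs.Pairwise (· ≤ ·) :=
    PySem.List.sorted_pairwise budgets (fun y => y)
  have hsum : bs.sum = budgets.sum := hperm.sum_eq
  have hfeq : ∀ c, fsum budgets c = fsum bs c := fun c => fsum_perm hperm.symm c
  -- max(budgets)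
  obtain ⟨mx, hmx⟩ : ∃ mx, PySem.List.max? budgets (fun y => y) = some mx := by
    rcases h : PySem.List.max? budgets (fun y => y) with _ | mx
    · exact absurd ((PySem.List.max?_eq_none_iff budgets (fun y => y)).mp h) hpre
    · exact ⟨mx, rfl⟩
  have hmxmem : mx ∈ budgets := PySem.List.max?_mem hmx
  have hmxmax : ∀ y ∈ budgets, y ≤ mx := PySem.List.max?_isMax hmx
  rw [hmx]
  simp only [Option.getD_some]
  by_cases hM : bs.sum ≤ M
  · -- total ≤ M : A climbs to mx, B returns max(last bs, 0)
    rw [if_pos hM]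
    have hall : ∀ c, (0:Int) ≤ c → c ≤ mx → fsum budgets c ≤ M := by
      intro c _ _
      calc fsum budgets c ≤ budgets.sum := fsum_le_sum budgets c
        _ ≤ M := by omega
    rw [loopA_all budgets M (mx - 0 + 1).toNat 0 mx 0 (le_refl _) hall]
    rw [PySem.List.pyGet?_neg_one]
    rw [List.getLast?_eq_some_getLast hne]
    simp only [Option.getD_some]
    have h1 : bs.getLast hne ≤ mx := hmxmax _ (hperm.mem_iff.mp (List.getLast_mem hne))
    have h2 : mx ≤ bs.getLast hne :=
      getLast_isMax bs hne hsort mx (hperm.mem_iff.mpr hmxmem)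
    have : bs.getLast hne = mx := by omega
    rw [this]
    split_ifs <;> simp [max_def] <;> omega
  · -- total > M : B finds the threshold c, A's binary search returns the same value
    rw [if_neg hM]
    obtain ⟨c, hcB, hc1, hc2⟩ :=
      loopB_spec M bs hsort (by omega) bs [] (by simp) hne (Or.inl rfl)
    simp only [List.length_nil, Nat.cast_zero, List.sum_nil] at hcB
    rw [hcB]
    have hP : ∀ x, fsum budgets x ≤ M ↔ x ≤ c := by
      intro x
      rw [hfeq]
      constructor
      · intro hx
        by_contra hxc
        have : fsum bs (c + 1) ≤ fsum bs x := fsum_mono bs (by omega)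
        omega
      · intro hx
        calc fsum bs x ≤ fsum bs c := fsum_mono bs hx
          _ ≤ M := hc1
    have hcmx : c < mx := by
      by_contra hcm
      have : fsum budgets mx ≤ M := (hP mx).mpr (by omega)
      rw [hfeq, fsum_of_le bs mx (fun b hb => hmxmax b (hperm.mem_iff.mp hb))] at this
      omega
    rw [loopA_main budgets M c hP (mx - 0 + 1).toNat 0 mx 0 (le_refl _)]
    split_ifs <;> simp [min_def, max_def] <;> omega
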